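-- pv_equiv track=rewrite | github.com/xueh-nv/aiconfigurator | src/aiconfigurator/sdk/perf_database.py | _nearest_1d_point_helper
-- ===== SOURCE A (Python) =====
-- def _nearest_1d_point_helper(x: int, values: list[int], inner_only: bool = True) -> tuple[int, int]:
--     """
--     Find the nearest 1d point
--     """
--     assert values is not None and len(values) >= 2, "values is None or len(values) < 2"
--     sorted_values = sorted(values)
--
--     if x < sorted_values[0]:
--         if inner_only:
--             raise ValueError(f"x is less than the smallest value in the list. {x=}, {sorted_values=}")
--         else:
--             return sorted_values[0], sorted_values[1]
--     elif x > sorted_values[-1]: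
--         if inner_only:
--             raise ValueError(f"x is greater than the largest value in the list. {x=}, {sorted_values=}")
--         else:
--             return sorted_values[-2], sorted_values[-1]
--
--     for i, value in enumerate(sorted_values):
--         if x >= value and i != len(sorted_values) - 1:
--             continue
--         else:
--             end = value
--             start = sorted_values[i - 1]
--             break
--     if start is None or end is None:
--         raise ValueError(f"start or end is None. {x=}, {sorted_values=}, start={start=}, end={end=}")
--     return start, end
-- ===== SOURCE B (Python) =====
-- def _nearest_1d_point_helper(x: int, values: list[int], inner_only: bool = True) -> tuple[int, int]:
--     """
--     Find the nearest 1d point (binary search instead of a linear scan).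
--     """
--     assert values is not None and len(values) >= 2, "values is None or len(values) < 2"
--     s = sorted(values)
--     if x < s[0]:
--         if inner_only:
--             raise ValueError(f"x is less than the smallest value in the list. {x=}, sorted_values={s}")
--         return s[0], s[1]
--     if x > s[-1]:
--         if inner_only:
--             raise ValueError(f"x is greater than the largest value in the list. {x=}, sorted_values={s}")
--         return s[-2], s[-1]
--     # bisect_right by hand: first index with x < s[i], clamped to len(s) - 1
--     lo, hi = 0, len(s)
--     while lo < hi:
--         mid = (lo + hi) // 2
--         if x < s[mid]:
--             hi = mid
--         else:
--             lo = mid + 1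
--     i = min(lo, len(s) - 1)
--     return s[i - 1], s[i]
-- ===== Notes on version B (the rewrite author's own statement) =====
-- stated objective: alternative
-- what changed: The linear enumerate scan with continue/break and the start/end-None recheck is replaced by a hand-written bisect_right binary search over the sorted list, with the result index clamped to len-1; total cost is still dominated by the sort.
import Mathlib
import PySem

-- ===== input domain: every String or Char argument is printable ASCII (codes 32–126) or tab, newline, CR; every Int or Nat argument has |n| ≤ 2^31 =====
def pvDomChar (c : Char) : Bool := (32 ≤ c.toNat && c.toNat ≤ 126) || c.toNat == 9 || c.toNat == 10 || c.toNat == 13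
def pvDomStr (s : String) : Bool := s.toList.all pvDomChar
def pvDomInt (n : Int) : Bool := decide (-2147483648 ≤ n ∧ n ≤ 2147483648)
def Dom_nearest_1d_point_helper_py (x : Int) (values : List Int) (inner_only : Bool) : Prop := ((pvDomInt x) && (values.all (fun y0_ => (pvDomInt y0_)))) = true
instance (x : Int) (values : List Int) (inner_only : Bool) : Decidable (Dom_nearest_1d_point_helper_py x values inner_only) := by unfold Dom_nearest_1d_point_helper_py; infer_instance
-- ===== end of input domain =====

-- B replaces A's linear enumerate scan by a hand-written bisect_right binary search (clamped to len-1); equivalence is proved on inputs where A returns.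

-- ===== PORT A =====
-- the 'for i, value in enumerate(sorted_values): …' loop of A; [] = the unreachable fall-through
-- (with len(values) >= 2 the loop always breaks; on [] Python would hit the undefined start/end)
def pvALoop (x : Int) (sv : List Int) : List (Int × Int) → Int × Int
  | [] => (0, 0)
  | (i, v) :: rest =>
      if x ≥ v ∧ i ≠ (sv.length : Int) - 1 then pvALoop x sv rest
      else ((PySem.List.pyGet? sv (i - 1)).getD 0, v)

def nearest_1d_point_helper_py (x : Int) (values : List Int) (inner_only : Bool) : Int × Int :=
  let sv := PySem.List.sorted values (fun v => v)
  if x < (PySem.List.pyGet? sv 0).getD 0 then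
    if inner_only then (0, 0)  -- raise ValueError: excluded by Pre_
    else ((PySem.List.pyGet? sv 0).getD 0, (PySem.List.pyGet? sv 1).getD 0)
  else if x > (PySem.List.pyGet? sv (-1)).getD 0 then
    if inner_only then (0, 0)  -- raise ValueError: excluded by Pre_
    else ((PySem.List.pyGet? sv (-2)).getD 0, (PySem.List.pyGet? sv (-1)).getD 0)
  else pvALoop x sv (PySem.List.enumerate sv)

-- ===== PORT B =====
-- the 'while lo < hi: …' bisect_right loop of Source B; (lo+hi)//2 = Nat division (lo, hi ≥ 0, so exact)
def pvBsearch (x : Int) (s : List Int) (lo hi : Nat) : Nat :=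
  if lo < hi then
    -- mid = (lo + hi) // 2 (Nat division: lo, hi ≥ 0, so exact)
    if x < (PySem.List.pyGet? s (((lo + hi) / 2 : Nat) : Int)).getD 0 then pvBsearch x s lo ((lo + hi) / 2)
    else pvBsearch x s ((lo + hi) / 2 + 1) hi
  else lo
termination_by hi - lo
decreasing_by all_goals omega

def nearest_1d_point_helper_py_alt (x : Int) (values : List Int) (inner_only : Bool) : Int × Int :=
  let s := PySem.List.sorted values (fun v => v)
  if x < (PySem.List.pyGet? s 0).getD 0 then
    if inner_only then (0, 0)  -- raise ValueError: excluded by Pre_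
    else ((PySem.List.pyGet? s 0).getD 0, (PySem.List.pyGet? s 1).getD 0)
  else if x > (PySem.List.pyGet? s (-1)).getD 0 then
    if inner_only then (0, 0)  -- raise ValueError: excluded by Pre_
    else ((PySem.List.pyGet? s (-2)).getD 0, (PySem.List.pyGet? s (-1)).getD 0)
  else
    let lo := pvBsearch x s 0 s.length
    let i := min lo (s.length - 1)
    ((PySem.List.pyGet? s ((i : Int) - 1)).getD 0, (PySem.List.pyGet? s (i : Int)).getD 0)

-- ===== PRECONDITION & SPEC =====
-- Pre_ excludes exactly the inputs where A raises: the AssertionError for len(values) < 2, and the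
-- two ValueErrors when inner_only is set and x lies outside [min(values), max(values)].
def Pre_nearest_1d_point_helper_py (x : Int) (values : List Int) (inner_only : Bool) : Prop :=
  2 ≤ values.length ∧ (inner_only = true → (∃ v ∈ values, v ≤ x) ∧ (∃ v ∈ values, x ≤ v))
instance (x : Int) (values : List Int) (inner_only : Bool) : Decidable (Pre_nearest_1d_point_helper_py x values inner_only) := by unfold Pre_nearest_1d_point_helper_py; infer_instance

def pvWitness_nearest_1d_point_helper_py : Int × List Int × Bool := (5, [10, 1], true)

def Spec_nearest_1d_point_helper_py (x : Int) (values : List Int) (inner_only : Bool) (out : Int × Int) : Prop := out = nearest_1d_point_helper_py_alt x values inner_only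
instance (x : Int) (values : List Int) (inner_only : Bool) (out : Int × Int) : Decidable (Spec_nearest_1d_point_helper_py x values inner_only out) := by unfold Spec_nearest_1d_point_helper_py; infer_instance

-- ===== CLAIM (what is proved, stated in full; the proofs are below) =====
def Claim_equal_nearest_1d_point_helper_py : Prop := ∀ (x : Int) (values : List Int) (inner_only : Bool), Dom_nearest_1d_point_helper_py x values inner_only → Pre_nearest_1d_point_helper_py x values inner_only → Spec_nearest_1d_point_helper_py x values inner_only (nearest_1d_point_helper_py x values inner_only)

-- ===== LEMMAS AND PROOFS =====

-- invariant proof for Source B's binary search: it returns the first index r with x < s[r] (or hi)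
lemma pvBsearch_spec (x : Int) (s : List Int) (hs : s.Pairwise (· ≤ ·)) :
    ∀ (n lo hi : Nat), hi - lo ≤ n → lo ≤ hi → hi ≤ s.length →
    (∀ (j : Nat) (h : j < s.length), j < lo → s[j] ≤ x) →
    (∀ (j : Nat) (h : j < s.length), hi ≤ j → x < s[j]) →
    lo ≤ pvBsearch x s lo hi ∧ pvBsearch x s lo hi ≤ hi ∧
      (∀ (j : Nat) (h : j < s.length), j < pvBsearch x s lo hi → s[j] ≤ x) ∧
      (∀ (j : Nat) (h : j < s.length), pvBsearch x s lo hi ≤ j → x < s[j]) := by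
  have hmono : ∀ (i j : Nat) (hi' : i < s.length) (hj : j < s.length), i ≤ j → s[i] ≤ s[j] := by
    intro i j hi' hj hij
    rcases Nat.lt_or_ge i j with h | h
    · exact (List.pairwise_iff_getElem.mp hs) i j hi' hj h
    · have : i = j := by omega
      subst this; rfl
  intro n
  induction n with
  | zero =>
    intro lo hi hn hlh hhl hA hB
    have : lo = hi := by omega
    subst this
    rw [pvBsearch]
    simp only [lt_irrefl, if_false]
    exact ⟨le_refl _, le_refl _, hA, hB⟩
  | succ n ih =>
    intro lo hi hn hlh hhl hA hB
    rw [pvBsearch]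
    by_cases hlt : lo < hi
    · rw [if_pos hlt]
      have hmid1 : lo ≤ (lo + hi) / 2 := by omega
      have hmid2 : (lo + hi) / 2 < hi := by omega
      have hmlen : (lo + hi) / 2 < s.length := by omega
      have hget : (PySem.List.pyGet? s (((lo + hi) / 2 : Nat) : Int)).getD 0 = s[(lo + hi) / 2] := by
        rw [PySem.List.pyGet?_natCast, List.getElem?_eq_getElem hmlen]; rfl
      rw [hget]
      by_cases hx : x < s[(lo + hi) / 2]
      · rw [if_pos hx]
        obtain ⟨a, b, c, d⟩ := ih lo ((lo + hi) / 2) (by omega) (by omega) (by omega) hA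
          (fun j h hj => lt_of_lt_of_le hx (hmono _ _ hmlen h hj))
        exact ⟨a, by omega, c, d⟩
      · rw [if_neg hx]
        have hle : s[(lo + hi) / 2] ≤ x := le_of_not_gt hx
        obtain ⟨a, b, c, d⟩ := ih ((lo + hi) / 2 + 1) hi (by omega) (by omega) hhl
          (fun j h hj => le_trans (hmono _ _ h hmlen (by omega)) hle) hB
        exact ⟨by omega, b, c, d⟩
    · rw [if_neg hlt]
      have hEq : lo = hi := by omega
      subst hEq
      exact ⟨le_refl _, le_refl _, hA, hB⟩

-- A's loop, started at position k of enumerate, returns the pair at index idx = min r (len-1)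
lemma pvALoop_spec (x : Int) (s : List Int) (idx : Nat)
    (hlen : 2 ≤ s.length) (hidx1 : 1 ≤ idx) (hidx2 : idx ≤ s.length - 1)
    (hbelow : ∀ (j : Nat) (h : j < s.length), j < idx → s[j] ≤ x)
    (hbreak : idx < s.length - 1 → x < s[idx]'(by omega)) :
    ∀ (k : Nat), k ≤ idx →
      pvALoop x s ((PySem.List.enumerate s).drop k) =
        ((PySem.List.pyGet? s ((idx : Int) - 1)).getD 0,
         (PySem.List.pyGet? s ((idx : Int))).getD 0) := by
  intro k hk
  induction hn : idx - k generalizing k with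
  | zero =>
    have hkidx : k = idx := by omega
    subst hkidx
    have hklen : k < s.length := by omega
    have hdrop : (PySem.List.enumerate s).drop k = ((k : Int), s[k]) :: (PySem.List.enumerate s).drop (k + 1) := by
      rw [List.drop_eq_getElem_cons (by simp [PySem.List.length_enumerate]; omega)]
      congr 1
      rw [PySem.List.getElem_enumerate]
      simp
    rw [hdrop, pvALoop]
    have hcond : ¬ (x ≥ s[k] ∧ (k : Int) ≠ (s.length : Int) - 1) := by
      rintro ⟨hge, hne⟩
      by_cases h : k < s.length - 1
      · exact absurd hge (not_le.mpr (hbreak h))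
      · exact hne (by omega)
    rw [if_neg hcond]
    have : (PySem.List.pyGet? s ((k : Int))).getD 0 = s[k] := by
      simp [PySem.List.pyGet?_natCast, List.getElem?_eq_getElem hklen]
    rw [this]
  | succ n ihn =>
    have hklt : k < idx := by omega
    have hklen : k < s.length := by omega
    have hdrop : (PySem.List.enumerate s).drop k = ((k : Int), s[k]) :: (PySem.List.enumerate s).drop (k + 1) := by
      rw [List.drop_eq_getElem_cons (by simp [PySem.List.length_enumerate]; omega)]
      congr 1
      rw [PySem.List.getElem_enumerate]
      simp
    rw [hdrop, pvALoop]
    have hcond : x ≥ s[k] ∧ (k : Int) ≠ (s.length : Int) - 1 := by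
      constructor
      · exact hbelow k hklen hklt
      · have : k < s.length - 1 := by omega
        omega
    rw [if_pos hcond]
    exact ihn (k + 1) (by omega) (by omega)

-- ===== VERDICT (by name: the statement is the Claim_ definition above) =====
theorem nearest_1d_point_helper_py_spec : Claim_equal_nearest_1d_point_helper_py := by
  intro x values inner_only _hdom hpre
  obtain ⟨hlen, _⟩ := hpre
  unfold Spec_nearest_1d_point_helper_py
  unfold nearest_1d_point_helper_py nearest_1d_point_helper_py_alt
  set s := PySem.List.sorted values (fun v => v) with hs_def
  have hslen : s.length = values.length := PySem.List.length_sorted values _ _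
  have hlen2 : 2 ≤ s.length := by omega
  have hs : s.Pairwise (· ≤ ·) := PySem.List.sorted_pairwise values (fun v => v)
  have hmono : ∀ (i j : Nat) (hi' : i < s.length) (hj : j < s.length), i ≤ j → s[i] ≤ s[j] := by
    intro i j hi' hj hij
    rcases Nat.lt_or_ge i j with h | h
    · exact (List.pairwise_iff_getElem.mp hs) i j hi' hj h
    · have : i = j := by omega
      subst this; rfl
  have h0len : 0 < s.length := by omega
  have hget0 : (PySem.List.pyGet? s 0).getD 0 = s[0] := by
    simp [PySem.List.pyGet?_zero, List.getElem?_eq_getElem h0len]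
  have hgetlast : (PySem.List.pyGet? s (-1)).getD 0 = s[s.length - 1]'(by omega) := by
    rw [PySem.List.pyGet?_neg_one, List.getLast?_eq_getElem?]
    simp [List.getElem?_eq_getElem (show s.length - 1 < s.length by omega)]
  by_cases hlo : x < (PySem.List.pyGet? s 0).getD 0
  · simp only [hlo, if_true]
  · simp only [hlo, if_false]
    by_cases hhi : x > (PySem.List.pyGet? s (-1)).getD 0
    · simp only [hhi, if_true]
    · simp only [hhi, if_false]
      -- the interesting branch: A's scan = B's clamped binary search
      have hx0 : s[0] ≤ x := by rw [hget0] at hlo; omega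
      have hxl : x ≤ s[s.length - 1]'(by omega) := by rw [hgetlast] at hhi; omega
      obtain ⟨hr1, hr2, hr3, hr4⟩ :=
        pvBsearch_spec x s hs s.length 0 s.length (by omega) (by omega) (le_refl _)
          (by intro j h hj; omega) (by intro j h hj; omega)
      set r := pvBsearch x s 0 s.length with hr_def
      have hrpos : 1 ≤ r := by
        by_contra h
        have hr0 : r = 0 := by omega
        have := hr4 0 h0len (by omega)
        omega
      set idx := min r (s.length - 1) with hidx_def
      have hidx1 : 1 ≤ idx := by omega
      have hidx2 : idx ≤ s.length - 1 := by omega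
      have heq := pvALoop_spec x s idx hlen2 hidx1 hidx2
        (by intro j h hj; exact hr3 j h (by omega))
        (by intro h; exact hr4 idx (by omega) (by omega))
        0 (by omega)
      simp only [List.drop_zero] at heq
      rw [heq]
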